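-- pv_equiv track=rewrite | github.com/charlesl46/phil | src/personal_assistant/assistant.py | hash_name
-- ===== SOURCE A (Python) =====
-- def hash_name(name : str):
--     hash = 0
--     for i,letter in enumerate(name):
--         try:
--             hash += ord(letter) * (i+1)
--         except:
--             hash += 1000
--     return hash
-- ===== SOURCE B (Python) =====
-- def hash_name(name: str):
--     # Same position-weighted sum of character codes, computed by a reverse
--     # running total instead of an explicit index multiply.
--     hash = 0
--     run = 0
--     for letter in reversed(name):
--         run += ord(letter)
--         hash += run
--     return hash
-- ===== Notes on version B (the rewrite author's own statement) =====
-- stated objective: alternative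
-- what changed: Replaces the enumerate-and-multiply loop (with its dead try/except) by a reverse traversal maintaining a running suffix total, so each code contributes position+1 times with no index or multiplication.
import Mathlib
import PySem

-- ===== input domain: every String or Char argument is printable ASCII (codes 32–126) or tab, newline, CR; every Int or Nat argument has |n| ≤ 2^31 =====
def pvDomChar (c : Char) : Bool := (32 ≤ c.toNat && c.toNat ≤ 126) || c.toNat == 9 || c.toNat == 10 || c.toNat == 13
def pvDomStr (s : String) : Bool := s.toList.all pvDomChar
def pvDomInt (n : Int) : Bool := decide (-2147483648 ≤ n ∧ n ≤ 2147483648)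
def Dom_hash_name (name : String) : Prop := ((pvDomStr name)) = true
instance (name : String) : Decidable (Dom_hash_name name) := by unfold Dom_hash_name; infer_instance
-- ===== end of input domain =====

-- B computes the same position-weighted code sum by a reverse running-total accumulation
-- instead of enumerate-and-multiply; same O(n) cost, different decomposition.

-- ===== PORT A =====
-- literal port of A: enumerate the characters and add ord(letter)*(i+1).
-- (the try/except in A is dead code: ord of a single character never raises)
def hash_name (name : String) : Int :=
  (PySem.List.enumerate name.toList 0).foldl
    (fun h p => h + (p.2.toNat : Int) * (p.1 + 1)) 0

-- ===== PORT B =====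
-- literal port of B: fold the reversed characters with state (hash, run).
def hash_name_alt (name : String) : Int :=
  (name.toList.reverse.foldl
    (fun (p : Int × Int) c => (p.1 + (p.2 + (c.toNat : Int)), p.2 + (c.toNat : Int)))
    (0, 0)).1

-- ===== PRECONDITION & SPEC =====
def Spec_hash_name (name : String) (out : Int) : Prop := out = hash_name_alt name
instance (name : String) (out : Int) : Decidable (Spec_hash_name name out) := by unfold Spec_hash_name; infer_instance

-- ===== CLAIM (what is proved, stated in full; the proofs are below) =====
def Claim_equal_hash_name : Prop := ∀ (name : String), Dom_hash_name name → Spec_hash_name name (hash_name name)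

-- ===== LEMMAS AND PROOFS =====

-- position-weighted sum with 1-based weights starting after offset s
def pvW (l : List Char) (s : Int) : Int :=
  match l with
  | [] => 0
  | c :: t => (c.toNat : Int) * (s + 1) + pvW t (s + 1)

-- plain sum of character codes
def pvS (l : List Char) : Int :=
  match l with
  | [] => 0
  | c :: t => (c.toNat : Int) + pvS t

theorem pvW_shift (l : List Char) : ∀ s : Int, pvW l (s + 1) = pvW l s + pvS l := by
  induction l with
  | nil => intro s; simp [pvW, pvS]
  | cons c t ih => intro s; simp [pvW, pvS, ih (s + 1)]; ring

theorem foldA (l : List Char) :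
    ∀ (s h : Int),
      (PySem.List.enumerate l s).foldl (fun h p => h + (p.2.toNat : Int) * (p.1 + 1)) h
        = h + pvW l s := by
  induction l with
  | nil => intro s h; simp [PySem.List.enumerate_nil, pvW]
  | cons c t ih =>
    intro s h
    simp only [PySem.List.enumerate_cons, List.foldl_cons, pvW, ih]
    ring

theorem foldB (l : List Char) :
    ∀ (res run : Int),
      l.reverse.foldl
        (fun (p : Int × Int) c => (p.1 + (p.2 + (c.toNat : Int)), p.2 + (c.toNat : Int)))
        (res, run)
        = (res + pvW l 0 + (l.length : Int) * run, run + pvS l) := by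
  induction l with
  | nil => intro res run; simp [pvW, pvS]
  | cons c t ih =>
    intro res run
    rw [List.reverse_cons, List.foldl_append, ih]
    simp only [List.foldl_cons, List.foldl_nil, pvW, pvS, List.length_cons]
    have h1 : pvW t 1 = pvW t 0 + pvS t := by
      have := pvW_shift t 0; simpa using this
    simp only [Prod.mk.injEq]
    constructor
    · rw [show (0:Int)+1 = 1 by ring, h1]; push_cast; ring
    · ring

-- ===== VERDICT (by name: the statement is the Claim_ definition above) =====
theorem hash_name_spec : Claim_equal_hash_name := by
  intro name _
  unfold Spec_hash_name hash_name hash_name_alt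
  rw [foldA, foldB]
  simp
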